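-- pv_equiv track=rewrite | github.com/ChoiRang/study | pythonProject/etc/code_test/test3.py | solution
-- ===== SOURCE A (Python) =====
-- def solution(candles):
-- 	day = 1
-- 	while day <= len(candles):
-- 		candles.sort(reverse=True)
-- 		for i in range(day):
-- 			candles[i] -= 1
-- 			if candles[i] == -1:
-- 				return day - 1
-- 		day += 1
-- 	return day - 1
-- ===== SOURCE B (Python) =====
-- def solution(candles):
--     # One initial sort, then O(n) merge of the two descending runs each day
--     # (instead of A's full re-sort every day). Return value only: A also
--     # mutates its argument in place; B does not.
--     s = sorted(candles, reverse=True)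
--     day = 1
--     while day <= len(s):
--         top = s[:day]
--         if 0 in top:
--             return day - 1
--         dec = [x - 1 for x in top]
--         rest = s[day:]
--         merged = []
--         i = j = 0
--         while i < len(dec) and j < len(rest):
--             if dec[i] >= rest[j]:
--                 merged.append(dec[i]); i += 1
--             else:
--                 merged.append(rest[j]); j += 1
--         merged.extend(dec[i:])
--         merged.extend(rest[j:])
--         s = merged
--         day += 1
--     return day - 1
-- ===== Notes on version B (the rewrite author's own statement) =====
-- stated objective: alternative
-- what changed: B sorts once up front and then, each day, checks for a 0 among the top `day` entries and merges the two already-descending runs (decremented prefix, untouched suffix) in one linear pass, instead of A's full re-sort of the whole list every day.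
import Mathlib
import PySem

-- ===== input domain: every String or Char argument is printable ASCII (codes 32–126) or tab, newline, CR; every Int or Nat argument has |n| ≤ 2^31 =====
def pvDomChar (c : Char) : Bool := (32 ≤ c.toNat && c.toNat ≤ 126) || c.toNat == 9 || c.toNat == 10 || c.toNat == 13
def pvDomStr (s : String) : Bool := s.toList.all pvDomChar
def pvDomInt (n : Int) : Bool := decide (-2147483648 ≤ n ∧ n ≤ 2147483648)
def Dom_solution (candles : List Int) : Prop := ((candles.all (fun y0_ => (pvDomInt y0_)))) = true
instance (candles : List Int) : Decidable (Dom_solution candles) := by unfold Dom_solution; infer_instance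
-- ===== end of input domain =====

-- B replaces A's per-day full re-sort by one initial sort plus a single linear merge of
-- the two descending runs each day (objective: alternative algorithm, same measured cost).
-- A sorts/mutates its argument in place; the equivalence proved here is about the
-- RETURN value only (B does not mutate).

-- ===== PORT A =====
-- the inner `for i in range(day)` loop over its index list: candles[i] -= 1, then
-- early `return` (none) on candles[i] == -1 (indices are in range at every call)
def pyInnerA (cs : List Int) (idxs : List Int) : Option (List Int) :=
  match idxs with
  | [] => some cs
  | i :: rest =>
      if PySem.List.pyGetD (PySem.List.pySetD cs i (PySem.List.pyGetD cs i 0 - 1)) i 0 = -1 then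
        none
      else
        pyInnerA (PySem.List.pySetD cs i (PySem.List.pyGetD cs i 0 - 1)) rest

-- the `while day <= len(candles)` loop of A; the loop runs at most len(candles) times,
-- so the fuel `len(candles)` (counting remaining iterations) only makes it structural
def pyLoopA (fuel : Nat) (cs : List Int) (day : Nat) : Int :=
  match fuel with
  | 0 => (day : Int) - 1
  | f + 1 =>
    if day ≤ cs.length then
      match pyInnerA (PySem.List.sorted cs (fun x => x) true) (PySem.List.pyRange 0 (day : Int) 1) with
      | none => (day : Int) - 1
      | some cs' => pyLoopA f cs' (day + 1)
    else (day : Int) - 1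

def solution (candles : List Int) : Int := pyLoopA candles.length candles 1

-- ===== PORT B =====
-- the index-based merge loop of Source B (two descending runs → one descending run)
def mergeB (dec rest : List Int) : List Int :=
  match dec, rest with
  | [], rest => rest
  | dec, [] => dec
  | a :: d, b :: r => if a ≥ b then a :: mergeB d (b :: r) else b :: mergeB (a :: d) r

-- the `while day <= len(s)` loop of Source B (same structural fuel as A's loop);
-- s[:day]/s[day:] are take/drop (non-negative bounds)
def pyLoopB (fuel : Nat) (s : List Int) (day : Nat) : Int :=
  match fuel with
  | 0 => (day : Int) - 1
  | f + 1 =>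
    if day ≤ s.length then
      if (0 : Int) ∈ s.take day then (day : Int) - 1
      else pyLoopB f (mergeB ((s.take day).map (· - 1)) (s.drop day)) (day + 1)
    else (day : Int) - 1

def solution_alt (candles : List Int) : Int :=
  pyLoopB (PySem.List.sorted candles (fun x => x) true).length
    (PySem.List.sorted candles (fun x => x) true) 1

-- ===== PRECONDITION & SPEC =====
def Spec_solution (candles : List Int) (out : Int) : Prop := out = solution_alt candles
instance (candles : List Int) (out : Int) : Decidable (Spec_solution candles out) := by unfold Spec_solution; infer_instance

-- ===== CLAIM (what is proved, stated in full; the proofs are below) =====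
def Claim_equal_solution : Prop := ∀ (candles : List Int), Dom_solution candles → Spec_solution candles (solution candles)

-- ===== LEMMAS AND PROOFS =====

-- A's inner loop on the (already sorted) list: early `return` (none) iff a 0 sits among
-- entries i..day-1; otherwise it yields the list with those entries decremented by one.
theorem pyInnerA_eq (s : List Int) (day i : Nat) (hday : day ≤ s.length) (hi : i ≤ day) :
    pyInnerA s (PySem.List.pyRange (i : Int) (day : Int) 1) =
      if (0 : Int) ∈ (s.drop i).take (day - i) then none
      else some (s.take i ++ ((s.drop i).take (day - i)).map (· - 1) ++ s.drop day) := by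
  by_cases hlt : i < day
  case neg =>
    have hieq : i = day := by omega
    subst hieq
    rw [PySem.List.pyRange_one_eq_nil (le_refl _)]
    simp [pyInnerA, List.take_append_drop]
  case pos =>
    have hil : i < s.length := by omega
    rw [PySem.List.pyRange_one_cons (by exact_mod_cast hlt)]
    rw [pyInnerA]
    have hget : PySem.List.pyGetD s (i : Int) 0 = s[i] := by
      simp [List.getElem?_eq_getElem hil]
    have hU : PySem.List.pySetD s (i : Int) (PySem.List.pyGetD s (i : Int) 0 - 1)
        = s.set i (s[i] - 1) := by simp [hget]
    rw [hU]
    have hlen' : i < (s.set i (s[i] - 1)).length := by simpa using hil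
    have hget2 : PySem.List.pyGetD (s.set i (s[i] - 1)) (i : Int) 0 = s[i] - 1 := by
      simp [List.getElem?_eq_getElem hlen']
    rw [hget2]
    have htake : (s.drop i).take (day - i) = s[i] :: (s.drop (i + 1)).take (day - (i + 1)) := by
      conv_lhs => rw [← List.getElem_cons_drop hil]
      rw [show day - i = (day - (i + 1)) + 1 by omega, List.take_succ_cons]
    by_cases hz : s[i] - 1 = (-1 : Int)
    · rw [if_pos hz, htake, if_pos (by simp; omega)]
    · rw [if_neg hz]
      rw [show ((i : Int) + 1) = ((i + 1 : Nat) : Int) by push_cast; ring]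
      rw [pyInnerA_eq (s.set i (s[i] - 1)) day (i + 1) (by simpa using hday) (by omega)]
      have hd1 : (s.set i (s[i] - 1)).drop (i + 1) = s.drop (i + 1) :=
        List.drop_set_of_lt (by omega)
      have hdday : (s.set i (s[i] - 1)).drop day = s.drop day :=
        List.drop_set_of_lt (by omega)
      have ht1 : (s.set i (s[i] - 1)).take (i + 1) = s.take i ++ [s[i] - 1] := by
        rw [List.set_eq_take_append_cons_drop, if_pos hil, List.take_append]
        simp [List.length_take, Nat.min_eq_left (le_of_lt hil), List.take_of_length_le]
      rw [hd1, hdday, ht1, htake]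
      have hz0 : s[i] ≠ 0 := by omega
      simp [Ne.symm hz0]
termination_by day - i

-- merged list is a permutation of the concatenation
theorem mergeB_perm (dec rest : List Int) : (mergeB dec rest).Perm (dec ++ rest) := by
  fun_induction mergeB dec rest with
  | case1 rest => exact List.Perm.refl _
  | case2 dec h => simp
  | case3 a d b r hge ih => exact ih.cons a
  | case4 a d b r hge ih => exact (ih.cons b).trans List.perm_middle.symm

-- merging two descending runs yields a descending list
theorem mergeB_sorted (dec rest : List Int)
    (hd : dec.Pairwise (fun a b => b ≤ a)) (hr : rest.Pairwise (fun a b => b ≤ a)) :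
    (mergeB dec rest).Pairwise (fun a b => b ≤ a) := by
  fun_induction mergeB dec rest with
  | case1 rest => exact hr
  | case2 dec h => exact hd
  | case3 a d b r hge ih =>
      rw [List.pairwise_cons] at hd
      refine List.pairwise_cons.mpr ⟨?_, ih hd.2 hr⟩
      intro y hy
      have := (mergeB_perm d (b :: r)).mem_iff.mp hy
      rcases List.mem_append.mp this with h1 | h1
      · exact hd.1 y h1
      · rw [List.pairwise_cons] at hr
        rcases h1 with _ | h1
        · omega
        · exact le_trans (hr.1 y (by assumption)) (by omega)
  | case4 a d b r hge ih =>
      rw [List.pairwise_cons] at hr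
      refine List.pairwise_cons.mpr ⟨?_, ih hd hr.2⟩
      intro y hy
      have := (mergeB_perm (a :: d) r).mem_iff.mp hy
      rcases List.mem_append.mp this with h1 | h1
      · rw [List.pairwise_cons] at hd
        rcases h1 with _ | h1
        · omega
        · exact le_trans (hd.1 y (by assumption)) (by omega)
      · exact hr.1 y h1

-- two descending permutations of the same list are equal
theorem desc_perm_eq (l₁ l₂ : List Int) (hp : l₁.Perm l₂)
    (h₁ : l₁.Pairwise (fun a b => b ≤ a)) (h₂ : l₂.Pairwise (fun a b => b ≤ a)) :
    l₁ = l₂ :=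
  PySem.List.eq_of_perm_of_pairwise_le_of_injective (fun x : Int => -x)
    (fun _ _ h => neg_inj.mp h) hp
    (h₁.imp (fun h => neg_le_neg h)) (h₂.imp (fun h => neg_le_neg h))

-- the main loop correspondence: A's state cs is any permutation of B's sorted state s
theorem loop_eq (fuel : Nat) (cs s : List Int) (day : Nat) (hperm : s.Perm cs)
    (hsort : s.Pairwise (fun a b => b ≤ a)) :
    pyLoopA fuel cs day = pyLoopB fuel s day := by
  induction fuel generalizing cs s day with
  | zero => rfl
  | succ f ih =>
    have hlen : s.length = cs.length := hperm.length_eq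
    by_cases h : day ≤ cs.length
    case neg =>
      rw [pyLoopA, pyLoopB, if_neg h, if_neg (by omega)]
    case pos =>
      rw [pyLoopA, pyLoopB, if_pos h, if_pos (by omega)]
      have hs : PySem.List.sorted cs (fun x => x) true = s :=
        desc_perm_eq _ _ ((PySem.List.sorted_perm cs (fun x => x) true).trans hperm.symm)
          (PySem.List.sorted_pairwise_rev cs (fun x => x)) hsort
      have h0 := pyInnerA_eq s day 0 (by omega) (by omega)
      rw [Nat.cast_zero] at h0
      rw [hs, h0]
      simp only [Nat.sub_zero, List.drop_zero, List.take_zero, List.nil_append]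
      by_cases hmem : (0 : Int) ∈ s.take day
      · rw [if_pos hmem, if_pos hmem]
      · rw [if_neg hmem, if_neg hmem]
        show pyLoopA f ((s.take day).map (· - 1) ++ s.drop day) (day + 1) = _
        have hdec : ((s.take day).map (· - 1)).Pairwise (fun a b : Int => b ≤ a) :=
          List.Pairwise.map _ (fun _ _ h => sub_le_sub_right h 1)
            (hsort.sublist (List.take_sublist day s))
        have hrest : (s.drop day).Pairwise (fun a b : Int => b ≤ a) :=
          hsort.sublist (List.drop_sublist day s)
        exact ih ((s.take day).map (· - 1) ++ s.drop day)
          (mergeB ((s.take day).map (· - 1)) (s.drop day)) (day + 1)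
          (mergeB_perm _ _) (mergeB_sorted _ _ hdec hrest)

-- ===== VERDICT (by name: the statement is the Claim_ definition above) =====
theorem solution_spec : Claim_equal_solution := by
  intro candles _
  unfold Spec_solution solution solution_alt
  rw [show candles.length = (PySem.List.sorted candles (fun x => x) true).length from
    (PySem.List.length_sorted candles (fun x => x) true).symm]
  exact loop_eq _ candles _ 1 (PySem.List.sorted_perm candles (fun x => x) true)
    (PySem.List.sorted_pairwise_rev candles (fun x => x))
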